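-- pv_equiv track=rewrite | github.com/the-tale/the-tale | src/the_tale/the_tale/portal/management/commands/lore_export_texts.py | remove_italic_from_quotes
-- ===== SOURCE A (Python) =====
-- def remove_italic_from_quotes(text):
--     text = text.replace('> *', '> ')
--
--     lines = []
--
--     for line in text.split('\n'):
--         if line.startswith('>') and line.endswith('*'):
--             line = line[:-1]
--
--         lines.append(line)
--
--     return '\n'.join(lines)
-- ===== SOURCE B (Python) =====
-- def remove_italic_from_quotes(text):
--     out = []
--     i = 0
--     n = len(text)
--     quoted = False
--     start = True
--     while i < n:
--         c = text[i]
--         if c == '\n':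
--             if quoted and out and out[-1] == '*':
--                 out.pop()
--             out.append('\n')
--             quoted = False
--             start = True
--             i += 1
--         else:
--             if start:
--                 quoted = (c == '>')
--                 start = False
--             if text.startswith('> *', i):
--                 out.append('>')
--                 out.append(' ')
--                 i += 3
--             else:
--                 out.append(c)
--                 i += 1
--     if quoted and out and out[-1] == '*':
--         out.pop()
--     return ''.join(out)
-- ===== Notes on version B (the rewrite author's own statement) =====
-- stated objective: alternative
-- what changed: B is a single character-level state-machine scan of the whole text (tracking 'current line starts with >' and popping a trailing '*' at each newline, doing the '> *' -> '> ' replacement on the fly), instead of A's whole-text str.replace followed by a split-into-lines loop with per-line startswith/endswith string operations.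
import Mathlib
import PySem

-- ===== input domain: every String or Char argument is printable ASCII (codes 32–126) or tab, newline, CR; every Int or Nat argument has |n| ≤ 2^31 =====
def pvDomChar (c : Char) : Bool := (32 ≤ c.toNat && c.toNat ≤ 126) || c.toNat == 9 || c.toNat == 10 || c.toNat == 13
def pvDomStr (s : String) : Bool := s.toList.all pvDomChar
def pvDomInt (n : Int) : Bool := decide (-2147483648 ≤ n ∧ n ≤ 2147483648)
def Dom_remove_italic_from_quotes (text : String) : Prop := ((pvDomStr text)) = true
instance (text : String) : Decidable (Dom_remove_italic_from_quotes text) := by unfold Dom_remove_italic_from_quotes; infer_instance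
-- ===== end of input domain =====

-- B replaces A's whole-text replace + per-line trim loop with a single character-level
-- state-machine scan of the text (alternative decomposition, same asymptotic cost).

-- ===== PORT A =====
-- A: text = text.replace('> *','> '); then loop over text.split('\n'), trimming a trailing '*'
-- from lines starting with '>', appending to a list; '\n'.join at the end.
def remove_italic_from_quotes (text : String) : String :=
  let text := PySem.Str.replace text "> *" "> "
  -- text.split('\n'): sep is the nonempty literal "\n", so split? = some (splitOn …)
  let lines : List String :=
    ((PySem.Chars.splitOn text.toList "\n".toList).map String.ofList).foldl
      (fun lines line =>
        let line :=
          if PySem.Str.startswith line ">" && PySem.Str.endswith line "*" then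
            PySem.Str.slice line none (some (-1))  -- line[:-1]
          else line
        lines ++ [line]) []
  PySem.Str.join "\n" lines

-- ===== PORT B =====
-- B: one while-loop over the characters; `out` is Python's output list kept in reverse
-- (append = cons, pop = tail), `quoted`/`start` are the two state booleans.
def pvBGo : List Char → List Char → Bool → Bool → List Char
  | [], out, quoted, _start =>
      -- final: if quoted and out and out[-1] == '*': out.pop()
      if quoted && (out.head? == some '*') then out.tail else out
  | c :: rest, out, quoted, start =>
      if c = '\n' then
        pvBGo rest ('\n' :: (if quoted && (out.head? == some '*') then out.tail else out)) false true
      else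
        let quoted := if start then decide (c = '>') else quoted
        if List.isPrefixOf ['>', ' ', '*'] (c :: rest) then  -- text.startswith('> *', i)
          pvBGo (rest.drop 2) (' ' :: '>' :: out) quoted false
        else
          pvBGo rest (c :: out) quoted false
termination_by l => l.length
decreasing_by
  all_goals simp [List.length_drop]

def remove_italic_from_quotes_alt (text : String) : String :=
  String.ofList (pvBGo text.toList [] false true).reverse  -- ''.join(out)

-- ===== PRECONDITION & SPEC =====
def Spec_remove_italic_from_quotes (text : String) (out : String) : Prop := out = remove_italic_from_quotes_alt text
instance (text : String) (out : String) : Decidable (Spec_remove_italic_from_quotes text out) := by unfold Spec_remove_italic_from_quotes; infer_instance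

-- ===== CLAIM (what is proved, stated in full; the proofs are below) =====
def Claim_equal_remove_italic_from_quotes : Prop := ∀ (text : String), Dom_remove_italic_from_quotes text → Spec_remove_italic_from_quotes text (remove_italic_from_quotes text)

-- ===== LEMMAS AND PROOFS =====

-- proof helpers: simple recursive characterisations of Chars.replace / Chars.splitOn
def pvR : List Char → List Char
  | [] => []
  | c :: t =>
    if List.isPrefixOf ['>', ' ', '*'] (c :: t) then '>' :: ' ' :: pvR (t.drop 2)
    else c :: pvR t
termination_by l => l.length
decreasing_by all_goals simp

def pvS : List Char → List (List Char)
  | [] => [[]]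
  | c :: t => if c = '\n' then [] :: pvS t else (pvS t).modifyHead (c :: ·)

-- the per-line trailing-'*' trim, on char lists
def pvTrim (l : List Char) : List Char :=
  if PySem.Chars.startswith l ">".toList && PySem.Chars.endswith l "*".toList then l.dropLast else l

theorem pvL_pat : "> *".toList = ['>', ' ', '*'] := by decide
theorem pvL_new : "> ".toList = ['>', ' '] := by decide
theorem pvL_nl : "\n".toList = ['\n'] := by decide

theorem pvS_ne_nil (l : List Char) : pvS l ≠ [] := by
  induction l with
  | nil => simp [pvS]
  | cons c t ih =>
    by_cases hc : c = '\n'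
    · simp [pvS, hc]
    · simp only [pvS, if_neg hc]
      cases hs : pvS t with
      | nil => exact absurd hs ih
      | cons a r => simp

theorem pvS_head_prefix : ∀ (l h : List Char) (rest : List (List Char)), pvS l = h :: rest → h <+: l := by
  intro l
  induction l with
  | nil =>
    intro h rest hs
    simp only [pvS] at hs
    obtain ⟨rfl, -⟩ := List.cons_eq_cons.mp hs.symm
    exact List.nil_prefix
  | cons c t ih =>
    intro h rest hs
    by_cases hc : c = '\n'
    · subst hc
      simp only [pvS, if_pos] at hs
      obtain ⟨rfl, -⟩ := List.cons_eq_cons.mp hs.symm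
      exact List.nil_prefix
    · simp only [pvS, if_neg hc] at hs
      cases ht : pvS t with
      | nil => exact absurd ht (pvS_ne_nil t)
      | cons a r =>
        rw [ht, List.modifyHead_cons] at hs
        obtain ⟨rfl, -⟩ := List.cons_eq_cons.mp hs.symm
        exact List.cons_prefix_cons.mpr ⟨rfl, ih a r ht⟩

theorem pvReplaceGo_eq : ∀ (fuel : Nat) (l acc : List Char), l.length ≤ fuel →
    PySem.Chars.replace.go ['>', ' ', '*'] ['>', ' '] fuel l acc = acc.reverse ++ pvR l := by
  intro fuel
  induction fuel with
  | zero =>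
    intro l acc hl
    cases l with
    | nil => simp [PySem.Chars.replace.go, pvR]
    | cons c t => simp at hl
  | succ n ih =>
    intro l acc hl
    cases l with
    | nil => simp [PySem.Chars.replace.go, pvR]
    | cons c t =>
      rw [PySem.Chars.replace.go]
      by_cases hp : List.isPrefixOf ['>', ' ', '*'] (c :: t)
      · rw [if_pos hp, ih _ _ (by simp at hl ⊢; omega)]
        rw [pvR, if_pos hp]
        simp
      · rw [if_neg hp, ih _ _ (by simp at hl ⊢; omega)]
        rw [pvR, if_neg hp]
        simp

theorem pvReplace_eq (l : List Char) :
    PySem.Chars.replace l ['>', ' ', '*'] ['>', ' '] = pvR l := by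
  rw [PySem.Chars.replace, if_neg (by simp)]
  exact pvReplaceGo_eq l.length l [] le_rfl

theorem pvSplitGo_eq : ∀ (fuel : Nat) (l cur : List Char) (acc : List (List Char)), l.length < fuel →
    PySem.Chars.splitOn.go ['\n'] fuel l cur acc
      = acc.reverse ++ (pvS l).modifyHead (cur.reverse ++ ·) := by
  intro fuel
  induction fuel with
  | zero => intro l cur acc hl; omega
  | succ n ih =>
    intro l cur acc hl
    cases l with
    | nil =>
      rw [PySem.Chars.splitOn.go]
      simp [pvS]
      omega
    | cons c t =>
      rw [PySem.Chars.splitOn.go]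
      by_cases hp : List.isPrefixOf ['\n'] (c :: t)
      · have hc : c = '\n' := by
          obtain ⟨u, hu⟩ := List.isPrefixOf_iff_prefix.mp hp
          simp only [List.cons_append, List.nil_append] at hu
          injection hu with h1 _
          exact h1.symm
        rw [if_pos hp, ih _ _ _ (by simp at hl ⊢; omega)]
        subst hc
        cases ht : pvS t with
        | nil => exact absurd ht (pvS_ne_nil t)
        | cons a r => simp [pvS, ht]
      · have hc : c ≠ '\n' := by
          intro h
          exact hp (by simp [List.isPrefixOf, h])
        rw [if_neg hp, ih _ _ _ (by simp at hl ⊢; omega)]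
        cases ht : pvS t with
        | nil => exact absurd ht (pvS_ne_nil t)
        | cons a r => simp [pvS, if_neg hc, ht]

theorem pvSplitOn_eq (l : List Char) : PySem.Chars.splitOn l ['\n'] = pvS l := by
  rw [PySem.Chars.splitOn, pvSplitGo_eq (l.length + 1) l [] [] (by omega)]
  cases h : pvS l with
  | nil => exact absurd h (pvS_ne_nil l)
  | cons a r => simp

theorem pvR_cons_pat (u : List Char) : pvR ('>' :: ' ' :: '*' :: u) = '>' :: ' ' :: pvR u := by
  have hp : List.isPrefixOf ['>', ' ', '*'] ('>' :: ' ' :: '*' :: u) = true :=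
    List.isPrefixOf_iff_prefix.mpr ⟨u, rfl⟩
  rw [pvR, if_pos hp]
  simp

theorem pvMainAux : ∀ (n : Nat) (l : List Char), l.length ≤ n → pvS (pvR l) = (pvS l).map pvR := by
  intro n
  induction n with
  | zero =>
    intro l hl
    cases l with
    | nil => simp [pvR, pvS]
    | cons c t => simp at hl
  | succ n ih =>
    intro l hl
    cases l with
    | nil => simp [pvR, pvS]
    | cons c t =>
      by_cases hp : List.isPrefixOf ['>', ' ', '*'] (c :: t)
      · obtain ⟨u, hu⟩ := List.isPrefixOf_iff_prefix.mp hp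
        simp only [List.cons_append, List.nil_append] at hu
        injection hu with h1 h2
        subst h1
        subst h2
        have hu_len : u.length ≤ n := by simp at hl; omega
        rw [pvR_cons_pat]
        have ihu := ih u hu_len
        cases hsu : pvS u with
        | nil => exact absurd hsu (pvS_ne_nil u)
        | cons a r =>
          have hRu : pvS (pvR u) = pvR a :: r.map pvR := by rw [ihu, hsu]; simp
          have hchars : ('>' : Char) ≠ '\n' ∧ (' ' : Char) ≠ '\n' ∧ ('*' : Char) ≠ '\n' := by decide
          simp [pvS, hchars.1, hchars.2.1, hchars.2.2, hRu, hsu, pvR_cons_pat a]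
      · by_cases hc : c = '\n'
        · subst hc
          rw [pvR, if_neg hp]
          have iht := ih t (by simp at hl; omega)
          simp [pvS, iht, pvR]
        · rw [pvR, if_neg hp]
          have iht := ih t (by simp at hl; omega)
          cases hst : pvS t with
          | nil => exact absurd hst (pvS_ne_nil t)
          | cons a r =>
            have hnp : ¬ List.isPrefixOf ['>', ' ', '*'] (c :: a) = true := by
              intro hpp
              have h1 : ['>', ' ', '*'] <+: (c :: a) := List.isPrefixOf_iff_prefix.mp hpp
              have h2 : a <+: t := pvS_head_prefix t a r hst
              have h3 : (c :: a) <+: (c :: t) := List.cons_prefix_cons.mpr ⟨rfl, h2⟩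
              exact hp (List.isPrefixOf_iff_prefix.mpr (h1.trans h3))
            have hRa : pvR (c :: a) = c :: pvR a := by rw [pvR, if_neg hnp]
            have hRt : pvS (pvR t) = pvR a :: r.map pvR := by rw [iht, hst]; simp
            simp [pvS, if_neg hc, hRt, hst, hRa]

theorem pvMain (l : List Char) : pvS (pvR l) = (pvS l).map pvR :=
  pvMainAux l.length l le_rfl

theorem pvFoldlPush {α β : Type} (g : α → β) : ∀ (xs : List α) (acc : List β),
    xs.foldl (fun a x => a ++ [g x]) acc = acc ++ xs.map g := by
  intro xs
  induction xs with
  | nil => simp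
  | cons x t ih => intro acc; simp [ih]

theorem pvLineA (l : List Char) :
    (if PySem.Str.startswith (String.ofList l) ">" && PySem.Str.endswith (String.ofList l) "*" then
        PySem.Str.slice (String.ofList l) none (some (-1))
      else String.ofList l).toList = pvTrim l := by
  rw [pvTrim]
  simp only [PySem.Str.startswith_eq, PySem.Str.endswith_eq, String.toList_ofList]
  by_cases hC : (PySem.Chars.startswith l ">".toList && PySem.Chars.endswith l "*".toList) = true
  · rw [if_pos hC, if_pos hC, PySem.Str.slice_to_neg_one, String.toList_ofList]
  · rw [if_neg hC, if_neg hC, String.toList_ofList]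

-- A's result, characterised on char lists: per line of pvS, replace then trim.
theorem pvA_eq (text : String) :
    (remove_italic_from_quotes text).toList
      = PySem.Chars.join ['\n'] ((pvS text.toList).map (fun v => pvTrim (pvR v))) := by
  unfold remove_italic_from_quotes
  rw [PySem.Str.toList_join, pvFoldlPush]
  simp only [List.nil_append, List.map_map, PySem.Str.toList_replace]
  simp only [pvL_pat, pvL_new, pvL_nl, pvReplace_eq, pvSplitOn_eq]
  rw [pvMain, List.map_map]
  refine congrArg (PySem.Chars.join ['\n']) ?_
  apply List.map_congr_left
  intro l hl
  simp only [Function.comp_apply]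
  rw [pvLineA]

-- ===== B-side lemmas =====

-- the three-char pattern contains no newline, so matching it against a line followed by
-- a '\n'-tail is matching it against the line alone
theorem pvPatAppend (u rest : List Char) :
    List.isPrefixOf ['>', ' ', '*'] (u ++ '\n' :: rest)
      = List.isPrefixOf ['>', ' ', '*'] u := by
  match u with
  | [] => simp [List.isPrefixOf]
  | [a] => simp [List.isPrefixOf]
  | [a, b] => simp [List.isPrefixOf]
  | a :: b :: c :: t => simp [List.isPrefixOf]

theorem pvR_head : ∀ (u : List Char), (pvR u).head? = u.head? := by
  intro u
  match u with
  | [] => simp [pvR]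
  | c :: t =>
    rw [pvR]
    by_cases hp : List.isPrefixOf ['>', ' ', '*'] (c :: t)
    · obtain ⟨v, hv⟩ := List.isPrefixOf_iff_prefix.mp hp
      simp only [List.cons_append, List.nil_append] at hv
      injection hv with h1 _
      rw [if_pos hp]
      simp [← h1]
    · rw [if_neg hp]
      simp

-- trailing pop distributed over an accumulator whose head is not '*'
theorem pvPopAppend (m acc : List Char) (hacc : acc.head? ≠ some '*') (q : Bool) :
    (if q && ((m ++ acc).head? == some '*') then (m ++ acc).tail else m ++ acc)
      = (if q && (m.head? == some '*') then m.tail else m) ++ acc := by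
  cases m with
  | nil =>
    have h1 : (acc.head? == some '*') = false := by
      cases h : acc.head? == some '*'
      · rfl
      · exact absurd (eq_of_beq h) hacc
    simp [h1]
  | cons c t =>
    simp only [List.cons_append, List.head?_cons]
    split_ifs <;> simp

theorem pvPrefixSingleton (a : Char) (m : List Char) : [a] <+: m ↔ m.head? = some a := by
  cases m with
  | nil => simp
  | cons c t => simp [List.cons_prefix_cons, eq_comm]

theorem pvSuffixSingleton (a : Char) (m : List Char) : [a] <:+ m ↔ m.reverse.head? = some a := by
  rw [← List.reverse_prefix]
  cases h : m.reverse with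
  | nil => simp
  | cons c t => simp [List.cons_prefix_cons, eq_comm]

-- pvTrim, reversed: pop the head of the reversed line
theorem pvTrimRev (m : List Char) :
    (pvTrim m).reverse
      = if (m.head? == some '>') && (m.reverse.head? == some '*')
          then m.reverse.tail else m.reverse := by
  have hs : PySem.Chars.startswith m ">".toList = (m.head? == some '>') := by
    rw [Bool.eq_iff_iff, PySem.Chars.startswith_iff, beq_iff_eq]
    show ['>'] <+: m ↔ _
    exact pvPrefixSingleton '>' m
  have he : PySem.Chars.endswith m "*".toList = (m.reverse.head? == some '*') := by
    rw [Bool.eq_iff_iff, PySem.Chars.endswith_iff, beq_iff_eq]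
    show ['*'] <:+ m ↔ _
    exact pvSuffixSingleton '*' m
  rw [pvTrim, hs, he]
  split_ifs
  · exact Eq.symm List.tail_reverse
  · rfl

-- state-machine: scanning one '\n'-free line from the middle state (start = false)
theorem pvMid : ∀ (n : Nat) (u : List Char), u.length ≤ n → '\n' ∉ u →
    ∀ (rest acc : List Char) (q : Bool),
    pvBGo (u ++ '\n' :: rest) acc q false
      = pvBGo rest
          ('\n' :: (if q && (((pvR u).reverse ++ acc).head? == some '*')
                      then ((pvR u).reverse ++ acc).tail
                      else (pvR u).reverse ++ acc)) false true := by
  intro n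
  induction n with
  | zero =>
    intro u hu _ rest acc q
    have hu0 : u = [] := List.length_eq_zero_iff.mp (Nat.le_zero.mp hu)
    subst hu0
    simp [pvBGo, pvR]
  | succ n ih =>
    intro u hu hnl rest acc q
    cases u with
    | nil => simp [pvBGo, pvR]
    | cons c t =>
      have hc : c ≠ '\n' := fun h => hnl (h ▸ List.mem_cons_self)
      have hnt : '\n' ∉ t := fun h => hnl (List.mem_cons_of_mem _ h)
      rw [List.cons_append, pvBGo, if_neg hc]
      have hpa := pvPatAppend (c :: t) rest
      rw [List.cons_append] at hpa
      by_cases hp : List.isPrefixOf ['>', ' ', '*'] (c :: t)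
      · obtain ⟨v, hv⟩ := List.isPrefixOf_iff_prefix.mp hp
        simp only [List.cons_append, List.nil_append] at hv
        injection hv with h1 h2
        rw [hpa, if_pos hp]
        have ht : t = ' ' :: '*' :: v := h2.symm
        have hv_nl : '\n' ∉ v := by
          intro hm
          exact hnt (ht ▸ List.mem_cons_of_mem _ (List.mem_cons_of_mem _ hm))
        have hdrop : (t ++ '\n' :: rest).drop 2 = v ++ '\n' :: rest := by
          rw [ht]; simp
        have hlen : v.length ≤ n := by
          rw [ht] at hu; simp at hu; omega
        simp only [hdrop, Bool.false_eq_true, if_false]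
        rw [ih v hlen hv_nl rest (' ' :: '>' :: acc) q]
        have hR : pvR (c :: t) = '>' :: ' ' :: pvR v := by
          rw [← h1, ht]; exact pvR_cons_pat v
        rw [hR]
        simp
      · rw [hpa, if_neg hp]
        simp only [Bool.false_eq_true, if_false]
        rw [ih t (by simp at hu; omega) hnt rest (c :: acc) q]
        have hR : pvR (c :: t) = c :: pvR t := by rw [pvR, if_neg hp]
        rw [hR]
        simp

-- the same scan when the text ends without a final newline
theorem pvMid0 : ∀ (n : Nat) (u : List Char), u.length ≤ n → '\n' ∉ u →
    ∀ (acc : List Char) (q : Bool),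
    pvBGo u acc q false
      = (if q && (((pvR u).reverse ++ acc).head? == some '*')
           then ((pvR u).reverse ++ acc).tail
           else (pvR u).reverse ++ acc) := by
  intro n
  induction n with
  | zero =>
    intro u hu _ acc q
    have hu0 : u = [] := List.length_eq_zero_iff.mp (Nat.le_zero.mp hu)
    subst hu0
    simp [pvBGo, pvR]
  | succ n ih =>
    intro u hu hnl acc q
    cases u with
    | nil => simp [pvBGo, pvR]
    | cons c t =>
      have hc : c ≠ '\n' := fun h => hnl (h ▸ List.mem_cons_self)
      have hnt : '\n' ∉ t := fun h => hnl (List.mem_cons_of_mem _ h)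
      rw [pvBGo, if_neg hc]
      by_cases hp : List.isPrefixOf ['>', ' ', '*'] (c :: t)
      · obtain ⟨v, hv⟩ := List.isPrefixOf_iff_prefix.mp hp
        simp only [List.cons_append, List.nil_append] at hv
        injection hv with h1 h2
        rw [if_pos hp]
        have ht : t = ' ' :: '*' :: v := h2.symm
        have hv_nl : '\n' ∉ v := by
          intro hm
          exact hnt (ht ▸ List.mem_cons_of_mem _ (List.mem_cons_of_mem _ hm))
        have hdrop : t.drop 2 = v := by rw [ht]; rfl
        have hlen : v.length ≤ n := by rw [ht] at hu; simp at hu; omega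
        simp only [hdrop, Bool.false_eq_true, if_false]
        rw [ih v hlen hv_nl (' ' :: '>' :: acc) q]
        have hR : pvR (c :: t) = '>' :: ' ' :: pvR v := by
          rw [← h1, ht]; exact pvR_cons_pat v
        rw [hR]
        simp
      · rw [if_neg hp]
        simp only [Bool.false_eq_true, if_false]
        rw [ih t (by simp at hu; omega) hnt (c :: acc) q]
        have hR : pvR (c :: t) = c :: pvR t := by rw [pvR, if_neg hp]
        rw [hR]
        simp

-- the first character of the text decides `quoted` once and for all
theorem pvStart (l acc : List Char) :
    pvBGo l acc false true = pvBGo l acc (l.head? == some '>') false := by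
  cases l with
  | nil => simp [pvBGo]
  | cons c t =>
    by_cases hc : c = '\n'
    · subst hc
      rw [pvBGo, pvBGo]
      simp
    · rw [pvBGo, if_neg hc, pvBGo, if_neg hc]
      have hb : (c == '>') = decide (c = '>') := by
        rw [Bool.eq_iff_iff]; simp
      simp [hb]

theorem pvS_no_nl (u : List Char) (h : '\n' ∉ u) : pvS u = [u] := by
  induction u with
  | nil => simp [pvS]
  | cons c t ih =>
    have hc : c ≠ '\n' := fun hc => h (hc ▸ List.mem_cons_self)
    have ht : '\n' ∉ t := fun hm => h (List.mem_cons_of_mem _ hm)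
    simp [pvS, hc, ih ht]

theorem pvS_append_nl (u rest : List Char) (h : '\n' ∉ u) :
    pvS (u ++ '\n' :: rest) = u :: pvS rest := by
  induction u with
  | nil => simp [pvS]
  | cons c t ih =>
    have hc : c ≠ '\n' := fun hc => h (hc ▸ List.mem_cons_self)
    have ht : '\n' ∉ t := fun hm => h (List.mem_cons_of_mem _ hm)
    cases hs : pvS (t ++ '\n' :: rest) with
    | nil => exact absurd hs (pvS_ne_nil _)
    | cons a r =>
      obtain ⟨ha, hr⟩ := List.cons_eq_cons.mp (hs.symm.trans (ih ht))
      simp [pvS, hc, hs, ha, hr]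

-- the whole scan equals per-line replace+trim, joined
theorem pvJoinB : ∀ (n : Nat) (l : List Char), l.length ≤ n →
    ∀ (acc : List Char), acc.head? ≠ some '*' →
    pvBGo l acc false true
      = (PySem.Chars.join ['\n'] ((pvS l).map (fun v => pvTrim (pvR v)))).reverse ++ acc := by
  intro n
  induction n with
  | zero =>
    intro l hl acc hacc
    have hl0 : l = [] := List.length_eq_zero_iff.mp (Nat.le_zero.mp hl)
    subst hl0
    simp [pvBGo, pvS, pvR, pvTrim, PySem.Chars.join_singleton, PySem.Chars.startswith]
  | succ n ih =>
    intro l hl acc hacc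
    have hnu : '\n' ∉ l.takeWhile (fun c => c != '\n') := by
      intro hm
      have := List.mem_takeWhile_imp hm
      simp at this
    cases hd : l.dropWhile (fun c => c != '\n') with
    | nil =>
      have hl' : l = l.takeWhile (fun c => c != '\n') := by
        conv_lhs => rw [← List.takeWhile_append_dropWhile (p := fun c => c != '\n') (l := l)]
        rw [hd, List.append_nil]
      have hnl : '\n' ∉ l := fun hm => hnu (hl' ▸ hm)
      rw [pvS_no_nl l hnl, pvStart,
        pvMid0 l.length l le_rfl hnl acc (l.head? == some '>'),
        pvPopAppend _ acc hacc, ← pvR_head l, ← pvTrimRev]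
      simp [PySem.Chars.join_singleton]
    | cons c rest =>
      have hcw : l.dropWhile (fun c => c != '\n') ≠ [] := by rw [hd]; simp
      have hc2 := List.head_dropWhile_not (fun c => c != '\n') hcw
      have hc3 : (l.dropWhile (fun c => c != '\n')).head hcw = c := by simp [hd]
      rw [hc3] at hc2
      have hc : c = '\n' := by simpa using hc2
      subst hc
      have hl2 : l = l.takeWhile (fun c => c != '\n') ++ '\n' :: rest := by
        conv_lhs => rw [← List.takeWhile_append_dropWhile (p := fun c => c != '\n') (l := l)]
        rw [hd]
      rw [hl2, pvS_append_nl _ rest hnu, pvStart,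
        pvMid (l.takeWhile (fun c => c != '\n')).length _ le_rfl hnu rest acc _]
      have hq : ((l.takeWhile (fun c => c != '\n') ++ '\n' :: rest).head? == some '>')
          = ((l.takeWhile (fun c => c != '\n')).head? == some '>') := by
        cases l.takeWhile (fun c => c != '\n') <;> simp
      rw [hq, pvPopAppend _ acc hacc, ← pvR_head, ← pvTrimRev]
      have hlen : rest.length ≤ n := by
        have := congrArg List.length hl2
        simp at this
        omega
      rw [ih rest hlen ('\n' :: ((pvTrim (pvR (l.takeWhile (fun c => c != '\n')))).reverse ++ acc)) (by simp)]
      cases hm : (pvS rest).map (fun v => pvTrim (pvR v)) with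
      | nil =>
        exact absurd (List.map_eq_nil_iff.mp hm) (pvS_ne_nil rest)
      | cons y ys =>
        rw [List.map_cons, hm, PySem.Chars.join_cons_cons]
        simp

-- ===== VERDICT (by name: the statement is the Claim_ definition above) =====
set_option maxHeartbeats 1000000 in
theorem remove_italic_from_quotes_spec : Claim_equal_remove_italic_from_quotes := by
  intro text _
  unfold Spec_remove_italic_from_quotes
  rw [← String.toList_inj, pvA_eq]
  unfold remove_italic_from_quotes_alt
  rw [String.toList_ofList,
    pvJoinB text.toList.length text.toList le_rfl [] (by simp)]
  simp
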